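-- pv_equiv track=rewrite | github.com/FahadEbrahim/matheel | matheel/native_codebleu.py | _strip_prefixed_comments
-- ===== SOURCE A (Python) =====
-- def _strip_line_comment(line, prefix):
--     in_single = False
--     in_double = False
--     index = 0
--     while index < len(line):
--         current = line[index]
--         if current == "\\" and (in_single or in_double):
--             index += 2
--             continue
--         if current == "'" and not in_double:
--             in_single = not in_single
--         elif current == '"' and not in_single:
--             in_double = not in_double
--         elif not in_single and not in_double and line.startswith(prefix, index):
--             return line[:index]
--         index += 1
--     return line
--
-- def _strip_prefixed_comments(source, prefixes):
--     cleaned = []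
--     for line in source.split("\n"):
--         current = line
--         for prefix in prefixes:
--             current = _strip_line_comment(current, prefix)
--         if current.strip():
--             cleaned.append(current)
--     return "\n".join(cleaned)
-- ===== SOURCE B (Python) =====
-- def _strip_prefixed_comments(source, prefixes):
--     # One quote-aware pass per line computes the positions where a comment may
--     # start; each prefix then only shrinks the cut position over that list.
--     cleaned = []
--     for line in source.split("\n"):
--         spots = []
--         in_single = in_double = False
--         i = 0
--         n = len(line)
--         while i < n:
--             ch = line[i]
--             if ch == "\\" and (in_single or in_double):
--                 i += 2
--                 continue
--             if ch == "'" and not in_double: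
--                 in_single = not in_single
--             elif ch == '"' and not in_single:
--                 in_double = not in_double
--             elif not in_single and not in_double:
--                 spots.append(i)
--             i += 1
--         cut = n
--         for prefix in prefixes:
--             lp = len(prefix)
--             for i in spots:
--                 if i < cut and i + lp <= cut and line.startswith(prefix, i):
--                     cut = i
--                     break
--         kept = line[:cut]
--         if kept.strip():
--             cleaned.append(kept)
--     return "\n".join(cleaned)
-- ===== Notes on version B (the rewrite author's own statement) =====
-- stated objective: alternative
-- what changed: A re-runs the quote/escape state machine over the line once per prefix; B runs it once per line to collect the outside-of-quotes candidate positions and then lets each prefix only shrink the cut position over that precomputed list.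
import Mathlib
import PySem

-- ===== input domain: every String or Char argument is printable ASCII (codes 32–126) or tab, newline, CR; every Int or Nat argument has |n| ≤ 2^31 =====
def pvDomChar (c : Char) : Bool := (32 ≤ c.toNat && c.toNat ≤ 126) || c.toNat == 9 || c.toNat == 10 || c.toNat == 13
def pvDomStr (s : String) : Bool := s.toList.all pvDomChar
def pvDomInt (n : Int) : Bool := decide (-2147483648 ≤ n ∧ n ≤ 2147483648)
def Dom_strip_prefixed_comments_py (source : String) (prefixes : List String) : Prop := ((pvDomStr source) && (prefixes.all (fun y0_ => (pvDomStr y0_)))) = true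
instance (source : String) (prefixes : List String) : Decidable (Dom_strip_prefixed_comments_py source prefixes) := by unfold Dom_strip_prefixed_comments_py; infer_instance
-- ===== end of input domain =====

-- B replaces A's per-prefix quote-tracking scan of each ln by ONE quote-aware pass that
-- records the candidate comment positions, over which each prefix then only shrinks the cut
-- (objective: alternative algorithm, same exact output).

-- ===== PORT A =====
-- _strip_line_comment's while loop (index-based, escape skips 2 only inside quotes)
def aScan (ln p : List Char) (ins ind : Bool) (idx : Nat) : List Char :=
  if h : idx < ln.length then
    if ln[idx] = '\\' ∧ (ins ∨ ind) then aScan ln p ins ind (idx+2)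
    else if ln[idx] = '\'' ∧ ¬ind then aScan ln p (!ins) ind (idx+1)
    else if ln[idx] = '"' ∧ ¬ins then aScan ln p ins (!ind) (idx+1)
    else if ¬ins ∧ ¬ind ∧ p.isPrefixOf (ln.drop idx) then ln.take idx
    else aScan ln p ins ind (idx+1)
  else ln
termination_by ln.length - idx
decreasing_by all_goals omega

def strip_prefixed_comments_py (source : String) (prefixes : List String) : String :=
  let cleaned := (PySem.Chars.splitOn source.toList ['\n']).foldl (fun acc ln =>
    let current := prefixes.foldl (fun cur p => aScan cur p.toList false false 0) ln
    if PySem.Chars.strip current ≠ [] then acc ++ [current] else acc) ([] : List (List Char))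
  String.ofList (PySem.Chars.join ['\n'] cleaned)

-- ===== PORT B =====
-- one quote-aware pass: the indices where a comment prefix may start
def bSpots (ln : List Char) (ins ind : Bool) (idx : Nat) : List Nat :=
  if h : idx < ln.length then
    if ln[idx] = '\\' ∧ (ins ∨ ind) then bSpots ln ins ind (idx+2)
    else if ln[idx] = '\'' ∧ ¬ind then bSpots ln (!ins) ind (idx+1)
    else if ln[idx] = '"' ∧ ¬ins then bSpots ln ins (!ind) (idx+1)
    else if ¬ins ∧ ¬ind then idx :: bSpots ln ins ind (idx+1)
    else bSpots ln ins ind (idx+1)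
  else []
termination_by ln.length - idx
decreasing_by all_goals omega

-- inner 'for i in spots: … break' loop of B
def bCut (ln p : List Char) (spots : List Nat) (cut : Nat) : Nat :=
  match spots with
  | [] => cut
  | i :: rest =>
    if i < cut ∧ i + p.length ≤ cut ∧ p.isPrefixOf (ln.drop i) then i
    else bCut ln p rest cut

def bLine (ln : List Char) (prefixes : List String) : List Char :=
  let spots := bSpots ln false false 0
  let cut := prefixes.foldl (fun c p => bCut ln p.toList spots c) ln.length
  ln.take cut

def strip_prefixed_comments_py_alt (source : String) (prefixes : List String) : String :=
  let cleaned := (PySem.Chars.splitOn source.toList ['\n']).foldl (fun acc ln =>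
    let kept := bLine ln prefixes
    if PySem.Chars.strip kept ≠ [] then acc ++ [kept] else acc) ([] : List (List Char))
  String.ofList (PySem.Chars.join ['\n'] cleaned)

-- ===== PRECONDITION & SPEC =====
def Spec_strip_prefixed_comments_py (source : String) (prefixes : List String) (out : String) : Prop := out = strip_prefixed_comments_py_alt source prefixes
instance (source : String) (prefixes : List String) (out : String) : Decidable (Spec_strip_prefixed_comments_py source prefixes out) := by unfold Spec_strip_prefixed_comments_py; infer_instance

-- ===== CLAIM (what is proved, stated in full; the proofs are below) =====
def Claim_equal_strip_prefixed_comments_py : Prop := ∀ (source : String) (prefixes : List String), Dom_strip_prefixed_comments_py source prefixes → Spec_strip_prefixed_comments_py source prefixes (strip_prefixed_comments_py source prefixes)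

-- ===== LEMMAS AND PROOFS =====

-- every candidate position lies at or after the scan's current index
theorem mem_bSpots_ge (ln : List Char) (ins ind : Bool) (idx : Nat) :
    ∀ i ∈ bSpots ln ins ind idx, idx ≤ i := by
  fun_induction bSpots ln ins ind idx with
  | case1 ins ind idx h hc1 ih => intro i hi; have := ih i hi; omega
  | case2 ins ind idx h hn1 hc2 ih => intro i hi; have := ih i hi; omega
  | case3 ins ind idx h hn1 hn2 hc3 ih => intro i hi; have := ih i hi; omega
  | case4 ins ind idx h hn1 hn2 hn3 hc4 ih =>
      intro i hi
      rcases List.mem_cons.mp hi with rfl | hi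
      · omega
      · have := ih i hi; omega
  | case5 ins ind idx h hn1 hn2 hn3 hn4 ih => intro i hi; have := ih i hi; omega
  | case6 ins ind idx h => intro i hi; simp at hi

-- the candidate positions of a truncated line are the truncation's survivors
theorem bSpots_take (ln : List Char) (cut : Nat) (ins ind : Bool) (idx : Nat) :
    bSpots (ln.take cut) ins ind idx = (bSpots ln ins ind idx).filter (fun i => decide (i < cut)) := by
  fun_induction bSpots ln ins ind idx with
  | case1 ins ind idx h hc1 ih =>
      by_cases hlt : idx < cut
      · rw [bSpots.eq_def, dif_pos (show idx < (ln.take cut).length by simp; omega)]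
        simp only [List.getElem_take]
        rw [if_pos hc1, ih]
      · rw [bSpots.eq_def, dif_neg (show ¬ idx < (ln.take cut).length by simp; omega)]
        symm; rw [List.filter_eq_nil_iff]
        intro i hi
        have := mem_bSpots_ge ln _ _ _ i hi
        simp; omega
  | case2 ins ind idx h hn1 hc2 ih =>
      by_cases hlt : idx < cut
      · rw [bSpots.eq_def, dif_pos (show idx < (ln.take cut).length by simp; omega)]
        simp only [List.getElem_take]
        rw [if_neg hn1, if_pos hc2, ih]
      · rw [bSpots.eq_def, dif_neg (show ¬ idx < (ln.take cut).length by simp; omega)]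
        symm; rw [List.filter_eq_nil_iff]
        intro i hi
        have := mem_bSpots_ge ln _ _ _ i hi
        simp; omega
  | case3 ins ind idx h hn1 hn2 hc3 ih =>
      by_cases hlt : idx < cut
      · rw [bSpots.eq_def, dif_pos (show idx < (ln.take cut).length by simp; omega)]
        simp only [List.getElem_take]
        rw [if_neg hn1, if_neg hn2, if_pos hc3, ih]
      · rw [bSpots.eq_def, dif_neg (show ¬ idx < (ln.take cut).length by simp; omega)]
        symm; rw [List.filter_eq_nil_iff]
        intro i hi
        have := mem_bSpots_ge ln _ _ _ i hi
        simp; omega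
  | case4 ins ind idx h hn1 hn2 hn3 hc4 ih =>
      by_cases hlt : idx < cut
      · rw [bSpots.eq_def, dif_pos (show idx < (ln.take cut).length by simp; omega)]
        simp only [List.getElem_take]
        rw [if_neg hn1, if_neg hn2, if_neg hn3, if_pos hc4, ih]
        rw [List.filter_cons_of_pos (by simp; omega)]
      · rw [bSpots.eq_def, dif_neg (show ¬ idx < (ln.take cut).length by simp; omega)]
        symm; rw [List.filter_eq_nil_iff]
        intro i hi
        rcases List.mem_cons.mp hi with rfl | hi
        · simp; omega
        · have := mem_bSpots_ge ln _ _ _ i hi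
          simp; omega
  | case5 ins ind idx h hn1 hn2 hn3 hn4 ih =>
      by_cases hlt : idx < cut
      · rw [bSpots.eq_def, dif_pos (show idx < (ln.take cut).length by simp; omega)]
        simp only [List.getElem_take]
        rw [if_neg hn1, if_neg hn2, if_neg hn3, if_neg hn4, ih]
      · rw [bSpots.eq_def, dif_neg (show ¬ idx < (ln.take cut).length by simp; omega)]
        symm; rw [List.filter_eq_nil_iff]
        intro i hi
        have := mem_bSpots_ge ln _ _ _ i hi
        simp; omega
  | case6 ins ind idx h =>
      rw [bSpots.eq_def, dif_neg (show ¬ idx < (ln.take cut).length by simp; omega)]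
      simp

-- A's scan, characterised by the first matching candidate position
theorem aScan_eq_find (ln p : List Char) (ins ind : Bool) (idx : Nat) :
    aScan ln p ins ind idx =
      match (bSpots ln ins ind idx).find? (fun i => p.isPrefixOf (ln.drop i)) with
      | some i => ln.take i
      | none => ln := by
  fun_induction aScan ln p ins ind idx with
  | case1 ins ind idx h hc1 ih => rw [bSpots.eq_def, dif_pos h, if_pos hc1]; exact ih
  | case2 ins ind idx h hn1 hc2 ih => rw [bSpots.eq_def, dif_pos h, if_neg hn1, if_pos hc2]; exact ih
  | case3 ins ind idx h hn1 hn2 hc3 ih => rw [bSpots.eq_def, dif_pos h, if_neg hn1, if_neg hn2, if_pos hc3]; exact ih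
  | case4 ins ind idx h hn1 hn2 hn3 hc4 =>
      rw [bSpots.eq_def, dif_pos h, if_neg hn1, if_neg hn2, if_neg hn3, if_pos ⟨hc4.1, hc4.2.1⟩]
      rw [List.find?_cons_of_pos (by exact hc4.2.2)]
  | case5 ins ind idx h hn1 hn2 hn3 hn4 ih =>
      by_cases hq : ¬ins ∧ ¬ind
      · rw [bSpots.eq_def, dif_pos h, if_neg hn1, if_neg hn2, if_neg hn3, if_pos (by exact_mod_cast hq)]
        have hnp : ¬ p.isPrefixOf (ln.drop idx) := fun hp => hn4 ⟨hq.1, hq.2, hp⟩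
        rw [List.find?_cons_of_neg (by simpa using hnp)]
        exact ih
      · rw [bSpots.eq_def, dif_pos h, if_neg hn1, if_neg hn2, if_neg hn3, if_neg (by exact_mod_cast hq)]
        exact ih
  | case6 ins ind idx h => rw [bSpots.eq_def, dif_neg h]; simp

-- B's inner loop, characterised the same way
theorem bCut_eq_find (ln p : List Char) (spots : List Nat) (cut : Nat) :
    bCut ln p spots cut =
      match spots.find? (fun i => decide (i < cut ∧ i + p.length ≤ cut ∧ p.isPrefixOf (ln.drop i))) with
      | some i => i
      | none => cut := by
  induction spots with
  | nil => rfl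
  | cons i rest ih =>
      by_cases hp : i < cut ∧ i + p.length ≤ cut ∧ p.isPrefixOf (ln.drop i)
      · rw [bCut, if_pos hp, List.find?_cons_of_pos (by simpa using hp)]
      · rw [bCut, if_neg hp, List.find?_cons_of_neg (by simpa using hp)]
        exact ih

-- one prefix step: A's scan of the truncated line = truncation at B's shrunken cut
theorem step_eq (ln p : List Char) (cut : Nat) :
    aScan (ln.take cut) p false false 0 =
      ln.take (bCut ln p (bSpots ln false false 0) cut) := by
  rw [aScan_eq_find, bSpots_take ln cut, List.find?_filter, bCut_eq_find]
  have hpred : (fun (i : Nat) => decide (decide (i < cut) = true ∧ p.isPrefixOf ((ln.take cut).drop i) = true))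
      = (fun (i : Nat) => decide (i < cut ∧ i + p.length ≤ cut ∧ p.isPrefixOf (ln.drop i))) := by
    funext i
    simp only [decide_eq_true_eq, decide_eq_decide, List.drop_take, List.isPrefixOf_iff_prefix,
      List.prefix_take_iff]
    constructor
    · rintro ⟨h1, h2, h3⟩; exact ⟨h1, by omega, h2⟩
    · rintro ⟨h1, h2, h3⟩; exact ⟨h1, h3, by omega⟩
  rw [hpred]
  cases hf : (bSpots ln false false 0).find? (fun i => decide (i < cut ∧ i + p.length ≤ cut ∧ p.isPrefixOf (ln.drop i))) with
  | none => rfl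
  | some i =>
      have := List.find?_some hf
      simp only [decide_eq_true_eq] at this
      simp only [List.take_take]
      rw [Nat.min_eq_left (by omega)]

-- the whole per-line computation agrees
theorem perLine_eq (ln : List Char) (prefixes : List String) :
    prefixes.foldl (fun cur p => aScan cur p.toList false false 0) ln = bLine ln prefixes := by
  have main : ∀ (ps : List String) (cut : Nat),
      ps.foldl (fun cur p => aScan cur p.toList false false 0) (ln.take cut) =
        ln.take (ps.foldl (fun c p => bCut ln p.toList (bSpots ln false false 0) c) cut) := by
    intro ps
    induction ps with
    | nil => intro cut; rfl
    | cons p rest ih =>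
        intro cut
        simp only [List.foldl_cons]
        rw [step_eq ln p.toList cut]
        exact ih _
  simpa only [bLine, List.take_length] using main prefixes ln.length

-- ===== VERDICT (by name: the statement is the Claim_ definition above) =====
theorem strip_prefixed_comments_py_spec : Claim_equal_strip_prefixed_comments_py := by
  intro source prefixes _
  unfold Spec_strip_prefixed_comments_py strip_prefixed_comments_py strip_prefixed_comments_py_alt
  simp only [perLine_eq]
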